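-- pv_equiv track=rewrite | github.com/remotion-dev/skills | skills/video-creator/scripts/video_engine.py | _typewriter_lines
-- ===== SOURCE A (Python) =====
-- from typing import List, Optional, Tuple
--
-- def _typewriter_lines(lines: List[str], visible_chars: int) -> List[str]:
--     """Return lines with only the first N characters visible."""
--     result = []
--     remaining = visible_chars
--     for line in lines:
--         if remaining <= 0:
--             break
--         if remaining >= len(line):
--             result.append(line)
--             remaining -= len(line)
--         else:
--             result.append(line[:remaining])
--             remaining = 0
--     return result
-- ===== SOURCE B (Python) =====
-- def _typewriter_lines(lines, visible_chars):
--     """Return lines with only the first N characters visible."""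
--     before = [0]
--     for line in lines:
--         before.append(before[-1] + len(line))
--     return [line if b + len(line) <= visible_chars else line[:visible_chars - b]
--             for line, b in zip(lines, before) if b < visible_chars]
-- ===== Notes on version B (the rewrite author's own statement) =====
-- stated objective: alternative
-- what changed: Replaces the mutable remaining-budget loop with an early break by a precomputed prefix-sum table of line lengths plus a single comprehension that drops, keeps or slices each line by comparing its prefix-before against visible_chars.
import Mathlib
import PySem

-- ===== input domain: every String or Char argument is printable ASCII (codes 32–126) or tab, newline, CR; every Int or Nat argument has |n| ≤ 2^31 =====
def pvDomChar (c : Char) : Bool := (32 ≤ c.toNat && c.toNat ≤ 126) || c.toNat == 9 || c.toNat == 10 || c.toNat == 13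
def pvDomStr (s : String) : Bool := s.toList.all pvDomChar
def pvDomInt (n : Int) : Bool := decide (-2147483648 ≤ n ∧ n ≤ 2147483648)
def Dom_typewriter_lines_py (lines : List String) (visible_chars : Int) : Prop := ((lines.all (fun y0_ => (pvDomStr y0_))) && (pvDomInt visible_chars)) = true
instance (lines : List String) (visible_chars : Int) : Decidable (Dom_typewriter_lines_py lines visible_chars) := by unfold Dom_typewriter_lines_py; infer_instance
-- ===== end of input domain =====

-- B replaces A's decrementing remaining-budget loop (with early break) by a prefix-sum table of
-- line lengths and a single comprehension keyed on each line's prefix-before; same cost, different structure.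


-- ===== PORT A =====
-- literal transliteration of A: walk the lines with a decrementing 'remaining' budget;
-- 'break' is the empty tail, and the slice branch continues with remaining = 0.
def typewriter_lines_py (lines : List String) (visible_chars : Int) : List String :=
  match lines with
  | [] => []
  | line :: rest =>
    if visible_chars ≤ 0 then []
    else if PySem.Str.len line ≤ visible_chars then
      line :: typewriter_lines_py rest (visible_chars - PySem.Str.len line)
    else
      PySem.Str.slice line none (some visible_chars) :: typewriter_lines_py rest 0

-- ===== PORT B =====
-- B's prefix-sum loop: before[0] = b and each line appends before[-1] + len(line)
def pvBeforeTable (b : Int) (lines : List String) : List Int :=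
  match lines with
  | [] => [b]
  | line :: rest => b :: pvBeforeTable (b + PySem.Str.len line) rest

-- literal transliteration of B: prefix-sum table 'before', then a comprehension over zip.
def typewriter_lines_py_alt (lines : List String) (visible_chars : Int) : List String :=
  let before : List Int := pvBeforeTable 0 lines
  (lines.zip before).filterMap (fun p =>
    if p.2 < visible_chars then
      some (if p.2 + PySem.Str.len p.1 ≤ visible_chars then p.1
            else PySem.Str.slice p.1 none (some (visible_chars - p.2)))
    else none)

-- ===== PRECONDITION & SPEC =====
def Spec_typewriter_lines_py (lines : List String) (visible_chars : Int) (out : List String) : Prop := out = typewriter_lines_py_alt lines visible_chars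
instance (lines : List String) (visible_chars : Int) (out : List String) : Decidable (Spec_typewriter_lines_py lines visible_chars out) := by unfold Spec_typewriter_lines_py; infer_instance

-- ===== CLAIM (what is proved, stated in full; the proofs are below) =====
def Claim_equal_typewriter_lines_py : Prop := ∀ (lines : List String) (visible_chars : Int), Dom_typewriter_lines_py lines visible_chars → Spec_typewriter_lines_py lines visible_chars (typewriter_lines_py lines visible_chars)

-- ===== LEMMAS AND PROOFS =====

theorem pv_len_nonneg (s : String) : 0 ≤ PySem.Str.len s := by
  simp [PySem.Str.len_eq]

-- once the prefix-before has reached the budget, the comprehension emits nothing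
theorem pv_tail_nil (v : Int) (lines : List String) (b : Int) (h : v ≤ b) :
    (lines.zip (pvBeforeTable b lines)).filterMap (fun p =>
      if p.2 < v then
        some (if p.2 + PySem.Str.len p.1 ≤ v then p.1
              else PySem.Str.slice p.1 none (some (v - p.2)))
      else none) = [] := by
  induction lines generalizing b with
  | nil => simp
  | cons line rest ih =>
    have hlen := pv_len_nonneg line
    simp only [pvBeforeTable, List.zip_cons_cons, List.filterMap_cons]
    rw [if_neg (by omega)]
    exact ih (b + PySem.Str.len line) (by omega)

-- the budget-walk with remaining = v - b equals the comprehension with prefix-before starting at b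
theorem pv_key (v : Int) (lines : List String) (b : Int) :
    typewriter_lines_py lines (v - b) =
    (lines.zip (pvBeforeTable b lines)).filterMap (fun p =>
      if p.2 < v then
        some (if p.2 + PySem.Str.len p.1 ≤ v then p.1
              else PySem.Str.slice p.1 none (some (v - p.2)))
      else none) := by
  induction lines generalizing b with
  | nil => simp [typewriter_lines_py]
  | cons line rest ih =>
    simp only [pvBeforeTable, List.zip_cons_cons, List.filterMap_cons, typewriter_lines_py]
    by_cases hb : b < v
    · rw [if_neg (by omega), if_pos hb]
      by_cases hfit : PySem.Str.len line ≤ v - b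
      · rw [if_pos hfit, if_pos (by omega)]
        have : v - b - PySem.Str.len line = v - (b + PySem.Str.len line) := by ring
        rw [this, ih (b + PySem.Str.len line)]
      · rw [if_neg hfit, if_neg (by omega)]
        have h0 : typewriter_lines_py rest 0 = [] := by
          cases rest <;> simp [typewriter_lines_py]
        rw [h0, pv_tail_nil v rest (b + PySem.Str.len line) (by have := pv_len_nonneg line; omega)]
    · rw [if_pos (by omega), if_neg (by omega)]
      exact (pv_tail_nil v rest (b + PySem.Str.len line)
        (by have := pv_len_nonneg line; omega)).symm

-- ===== VERDICT (by name: the statement is the Claim_ definition above) =====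
theorem typewriter_lines_py_spec : Claim_equal_typewriter_lines_py := by
  intro lines v _
  unfold Spec_typewriter_lines_py typewriter_lines_py_alt
  have := pv_key v lines 0
  simpa using this
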